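-- pv_equiv track=rewrite | github.com/MarcdeFalco/icfp15 | camlia/mouvements.py | to_moves
-- ===== SOURCE A (Python) =====
-- def normalize_phrase(s):
--     v = [ "p'!.03", "bcefy2", "aghij4",
--             "lmno 5", "dqrvz1", "kstuwx" ]
--     s2 = ''
--     for c in s:
--         for sv in v:
--             if c in sv:
--                 s2 += sv[0]
--     return s2
--
-- def to_moves(s):
--     s = normalize_phrase(s)
--     cc = {
--             'p' : '\\sW', 'b' : '\\sE',
--             'a' : '\\sSW', 'l' : '\\sSE',
--             'd' : '\\sCW', 'k' : '\\sCCW'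
--         }
--     s2 = ''
--     for c in s:
--         s2 += cc[c]
--     return s2
-- ===== SOURCE B (Python) =====
-- def to_moves(s):
--     cc = {
--             'p' : '\\sW', 'b' : '\\sE',
--             'a' : '\\sSW', 'l' : '\\sSE',
--             'd' : '\\sCW', 'k' : '\\sCCW'
--         }
--     groups = [ "p'!.03", "bcefy2", "aghij4",
--                "lmno 5", "dqrvz1", "kstuwx" ]
--     table = {ch: cc[g[0]] for g in groups for ch in g}
--     return ''.join(table[c] for c in s if c in table)
-- ===== Notes on version B (the rewrite author's own statement) =====
-- stated objective: simpler
-- what changed: Replaces the two-stage normalize-then-map (inner loop over six group strings per character, building an intermediate normalized string) by one precomputed char-to-move table and a single join pass with a membership guard.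
import Mathlib
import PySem

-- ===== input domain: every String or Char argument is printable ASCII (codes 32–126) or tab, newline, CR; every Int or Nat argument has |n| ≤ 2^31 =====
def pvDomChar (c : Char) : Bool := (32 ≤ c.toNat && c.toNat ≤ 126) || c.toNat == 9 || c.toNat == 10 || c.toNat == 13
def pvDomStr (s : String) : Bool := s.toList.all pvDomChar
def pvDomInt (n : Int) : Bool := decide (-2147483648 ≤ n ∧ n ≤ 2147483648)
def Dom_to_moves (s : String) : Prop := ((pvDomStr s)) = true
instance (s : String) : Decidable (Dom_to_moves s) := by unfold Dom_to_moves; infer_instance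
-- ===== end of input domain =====

set_option maxRecDepth 40000
set_option maxHeartbeats 1000000


-- B replaces A's two-stage normalize-then-map by one precomputed char→move table and a single pass (simpler).

-- ===== PORT A =====
def pvGroups : List String := ["p'!.03", "bcefy2", "aghij4", "lmno 5", "dqrvz1", "kstuwx"]

def normalize_phrase (s : String) : String :=
  String.ofList <| s.toList.foldl (fun s2 c =>
    pvGroups.foldl (fun s2 sv =>
      if c ∈ sv.toList then s2 ++ [sv.toList.headD ' '] else s2) s2) []
  -- sv[0]: every group literal is nonempty, so headD never takes its default

def pvCC : PySem.Dict Char String :=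
  PySem.Dict.ofList [('p', "\\sW"), ('b', "\\sE"), ('a', "\\sSW"),
                     ('l', "\\sSE"), ('d', "\\sCW"), ('k', "\\sCCW")]

-- cc[c]: normalize_phrase emits only group heads, which are exactly cc's keys, so the
-- lookup never raises KeyError and getD with an unreachable default is exact
def to_moves (s : String) : String :=
  String.ofList <| (normalize_phrase s).toList.foldl (fun s2 c => s2 ++ (pvCC.getD c "").toList) []

-- ===== PORT B =====
def pvTable : PySem.Dict Char String :=
  pvGroups.foldl (fun d g =>
    g.toList.foldl (fun d ch => d.insert ch (pvCC.getD (g.toList.headD ' ') "")) d)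
    PySem.Dict.empty

def to_moves_alt (s : String) : String :=
  -- ''.join(table[c] for c in s if c in table)
  String.ofList <| s.toList.foldl (fun acc c =>
    match pvTable.get? c with
    | some m => acc ++ m.toList
    | none => acc) []

-- ===== PRECONDITION & SPEC =====
def Spec_to_moves (s : String) (out : String) : Prop := out = to_moves_alt s
instance (s : String) (out : String) : Decidable (Spec_to_moves s out) := by unfold Spec_to_moves; infer_instance

-- ===== CLAIM (what is proved, stated in full; the proofs are below) =====
def Claim_equal_to_moves : Prop := ∀ (s : String), Dom_to_moves s → Spec_to_moves s (to_moves s)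

-- ===== LEMMAS AND PROOFS =====

-- per-character contribution of A's two stages
def pvN1 (c : Char) : List Char :=
  pvGroups.foldl (fun r sv => if c ∈ sv.toList then r ++ [sv.toList.headD ' '] else r) []

-- per-character contribution of B's single pass
def pvB1 (c : Char) : List Char :=
  match pvTable.get? c with
  | some m => m.toList
  | none => []

lemma pvInner (c : Char) (acc : List Char) :
    pvGroups.foldl (fun s2 sv => if c ∈ sv.toList then s2 ++ [sv.toList.headD ' '] else s2) acc
    = acc ++ pvN1 c := by
  unfold pvN1
  rw [PySem.List.foldl_append_ite, PySem.List.foldl_append_ite]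
  simp

lemma pvN1_foldl (l : List Char) (acc : List Char) :
    l.foldl (fun s2 c => pvGroups.foldl (fun s2 sv =>
      if c ∈ sv.toList then s2 ++ [sv.toList.headD ' '] else s2) s2) acc
    = acc ++ l.flatMap pvN1 := by
  induction l generalizing acc with
  | nil => simp
  | cons c l ih => rw [List.foldl_cons, pvInner, ih]; simp

lemma pvB1_foldl (l : List Char) (acc : List Char) :
    l.foldl (fun acc c => match pvTable.get? c with
      | some m => acc ++ m.toList
      | none => acc) acc
    = acc ++ l.flatMap pvB1 := by
  induction l generalizing acc with
  | nil => simp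
  | cons c l ih =>
    simp only [List.foldl_cons, ih, List.flatMap_cons]
    cases h : pvTable.get? c <;> simp [pvB1, h]

-- mapping stage of A as flatMap
lemma pvMap_foldl (l : List Char) (acc : List Char) :
    l.foldl (fun s2 c => s2 ++ (pvCC.getD c "").toList) acc
    = acc ++ l.flatMap (fun c => (pvCC.getD c "").toList) := by
  exact PySem.List.foldl_append_eq_flatMap _ _ _

-- per-character agreement, for every char whose code is < 128 (covers the whole domain)
lemma pvPerChar (c : Char) (h : c.toNat < 128) :
    (pvN1 c).flatMap (fun d => (pvCC.getD d "").toList) = pvB1 c := by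
  have h2 : ∀ n ∈ List.range 128,
      (pvN1 (Char.ofNat n)).flatMap (fun d => (pvCC.getD d "").toList)
        = pvB1 (Char.ofNat n) := by decide
  have := h2 c.toNat (List.mem_range.mpr h)
  rwa [Char.ofNat_toNat] at this

-- ===== VERDICT (by name: the statement is the Claim_ definition above) =====
theorem to_moves_spec : Claim_equal_to_moves := by
  intro s hdom
  unfold Spec_to_moves to_moves to_moves_alt normalize_phrase
  rw [pvN1_foldl, pvB1_foldl, pvMap_foldl]
  simp only [List.nil_append, String.toList_ofList, List.flatMap_assoc]
  congr 1
  apply List.flatMap_congr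
  intro c hc
  have hdc : pvDomChar c = true := (List.all_eq_true.mp hdom) c hc
  have hlt : c.toNat < 128 := by
    simp [pvDomChar] at hdc
    omega
  exact pvPerChar c hlt
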